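-- pv_equiv track=rewrite | github.com/isteele1/eecs452 | spectral_analysis.py | get_jamming_regions
-- ===== SOURCE A (Python) =====
-- def get_jamming_regions(classification):
--     regions = []
--     start = None
--     for i, label in enumerate(classification):
--         if label == "Jamming":
--             if start is None:
--                 start = i
--         else:
--             if start is not None:
--                 regions.append((start, i - 1))
--                 start = None
--     # If the last frames are "Jamming"
--     if start is not None:
--         regions.append((start, len(classification) - 1))
--     return regions
-- ===== SOURCE B (Python) =====
-- def get_jamming_regions(classification):
--     # Run-grouping two-pointer scan: consume each maximal run of equal labels
--     # at once instead of a per-element start/None state machine.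
--     regions = []
--     i, n = 0, len(classification)
--     while i < n:
--         j = i + 1
--         while j < n and classification[j] == classification[i]:
--             j += 1
--         if classification[i] == "Jamming":
--             regions.append((i, j - 1))
--         i = j
--     return regions
-- ===== Notes on version B (the rewrite author's own statement) =====
-- stated objective: alternative
-- what changed: Replaced the per-element start/None sentinel state machine with a two-pointer run-grouping scan that consumes each maximal run of equal labels at once.
import Mathlib
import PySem

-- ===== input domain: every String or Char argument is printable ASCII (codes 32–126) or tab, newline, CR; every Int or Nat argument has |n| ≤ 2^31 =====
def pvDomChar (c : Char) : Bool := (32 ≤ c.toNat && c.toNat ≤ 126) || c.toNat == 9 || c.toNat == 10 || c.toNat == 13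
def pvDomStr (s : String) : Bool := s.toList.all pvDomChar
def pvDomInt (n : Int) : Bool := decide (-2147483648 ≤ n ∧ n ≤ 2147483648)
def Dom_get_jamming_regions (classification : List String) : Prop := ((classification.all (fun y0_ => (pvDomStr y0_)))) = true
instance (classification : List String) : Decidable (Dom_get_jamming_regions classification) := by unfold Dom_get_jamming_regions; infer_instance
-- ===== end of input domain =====

-- B replaces A's per-element start/None sentinel state machine by a two-pointer
-- run-grouping scan (alternative decomposition, same O(n) cost).


-- ===== PORT A =====
-- A's for-loop over enumerate(classification) with state (regions, start),
-- written as the obvious structural recursion carrying the index i and start;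
-- the trailing "if start is not None: append (start, len-1)" is the base case
-- (at the end of the list i = len(classification)).
def aGo (l : List String) (i : Int) (start : Option Int) : List (Int × Int) :=
  match l with
  | [] =>
      match start with
      | some s => [(s, i - 1)]
      | none => []
  | label :: rest =>
      if label == "Jamming" then
        match start with
        | none => aGo rest (i + 1) (some i)
        | some s => aGo rest (i + 1) (some s)
      else
        match start with
        | some s => (s, i - 1) :: aGo rest (i + 1) none
        | none => aGo rest (i + 1) none

def get_jamming_regions (classification : List String) : List (Int × Int) :=
  aGo classification 0 none

-- ===== PORT B =====
-- B's outer while-loop over maximal runs, as recursion on the remaining list: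
-- each step consumes one maximal run of labels equal to the head.
def altLoop (l : List String) (i : Int) : List (Int × Int) :=
  match l with
  | [] => []
  | x :: xs =>
      let k : Int := (xs.takeWhile (· == x)).length + 1
      let rest := altLoop (xs.dropWhile (· == x)) (i + k)
      if x == "Jamming" then (i, i + k - 1) :: rest else rest
termination_by l.length
decreasing_by
  simp only [List.length_cons]
  exact Nat.lt_succ_of_le (List.length_dropWhile_le _ _)

def get_jamming_regions_alt (classification : List String) : List (Int × Int) :=
  altLoop classification 0

-- ===== PRECONDITION & SPEC =====
def Spec_get_jamming_regions (classification : List String) (out : List (Int × Int)) : Prop := out = get_jamming_regions_alt classification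
instance (classification : List String) (out : List (Int × Int)) : Decidable (Spec_get_jamming_regions classification out) := by unfold Spec_get_jamming_regions; infer_instance

-- ===== CLAIM (what is proved, stated in full; the proofs are below) =====
def Claim_equal_get_jamming_regions : Prop := ∀ (classification : List String), Dom_get_jamming_regions classification → Spec_get_jamming_regions classification (get_jamming_regions classification)

-- ===== LEMMAS AND PROOFS =====

-- While a region is open (start = some s), A keeps extending it over the
-- pending run of "Jamming" labels and closes it when the run ends.
theorem aGo_some (l : List String) (i s : Int) :
    aGo l i (some s) =
      (s, i + ((l.takeWhile (· == "Jamming")).length : Int) - 1) ::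
        aGo (l.dropWhile (· == "Jamming")) (i + ((l.takeWhile (· == "Jamming")).length : Int)) none := by
  induction l generalizing i with
  | nil => simp [aGo]
  | cons x xs ih =>
      by_cases hx : x = "Jamming"
      · subst hx
        simp only [aGo, List.takeWhile_cons, List.dropWhile_cons, beq_self_eq_true, if_true]
        rw [ih (i + 1)]
        simp only [List.length_cons]
        push_cast
        ring_nf
      · have hb : (x == "Jamming") = false := beq_eq_false_iff_ne.mpr hx
        simp [aGo, hb]

-- Skipping one non-"Jamming" label is the same as consuming its whole run.
theorem altLoop_skip (x : String) (xs : List String) (i : Int) (hx : x ≠ "Jamming") :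
    altLoop (x :: xs) i = altLoop xs (i + 1) := by
  have hb : (x == "Jamming") = false := beq_eq_false_iff_ne.mpr hx
  cases xs with
  | nil => simp [altLoop, hb]
  | cons y ys =>
      by_cases hy : y = x
      · subst hy
        rw [altLoop, altLoop]
        simp only [hb, Bool.false_eq_true, if_false, List.takeWhile_cons, List.dropWhile_cons,
          beq_self_eq_true, if_true, List.length_cons]
        push_cast
        ring_nf
      · have hyb : (y == x) = false := beq_eq_false_iff_ne.mpr hy
        rw [altLoop]
        simp only [hb, Bool.false_eq_true, if_false, List.takeWhile_cons, hyb,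
          List.dropWhile_cons]
        norm_num

theorem aGo_none_eq_altLoop (n : ℕ) :
    ∀ (l : List String), l.length ≤ n → ∀ i : Int, aGo l i none = altLoop l i := by
  induction n with
  | zero =>
      intro l hl i
      have : l = [] := List.eq_nil_of_length_eq_zero (Nat.le_zero.mp hl)
      subst this; simp [aGo, altLoop]
  | succ n ih =>
      intro l hl i
      cases l with
      | nil => simp [aGo, altLoop]
      | cons x xs =>
          simp only [List.length_cons, Nat.succ_le_succ_iff] at hl
          by_cases hx : x = "Jamming"
          · subst hx
            rw [altLoop]
            simp only [aGo, beq_self_eq_true, if_true]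
            rw [aGo_some]
            have hdrop : (xs.dropWhile (· == "Jamming")).length ≤ n :=
              le_trans (List.length_dropWhile_le _ _) hl
            rw [ih _ hdrop]
            ring_nf
          · have hb : (x == "Jamming") = false := beq_eq_false_iff_ne.mpr hx
            simp only [aGo, hb, Bool.false_eq_true, if_false]
            rw [ih xs hl (i + 1), altLoop_skip x xs i hx]

-- ===== VERDICT (by name: the statement is the Claim_ definition above) =====
theorem get_jamming_regions_spec : Claim_equal_get_jamming_regions := by
  intro classification _
  unfold Spec_get_jamming_regions get_jamming_regions get_jamming_regions_alt
  exact aGo_none_eq_altLoop classification.length classification le_rfl 0
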